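-- pv_equiv track=rewrite | github.com/isKage/dsa-notes | Assignments/HW1/hw1_7_stack_backtracking.py | pop_seq
-- ===== SOURCE A (Python) =====
-- class ArrayStack:
--     """基于数组的栈数据类型 LIFO"""
--
--     def __init__(self):
--         """初始化空栈"""
--         self._data = []  # 适配器模式，隐藏 list 实例化对象
--
--     def __len__(self):
--         """栈的元素个数"""
--         return len(self._data)
--
--     def is_empty(self):
--         """判断是否为空"""
--         return len(self._data) == 0
--
--     def push(self, e):
--         """向栈顶插入元素"""
--         self._data.append(e)
--
--     def top(self):
--         """返回栈顶元素"""
--         if self.is_empty():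
--             raise Empty("Stack is empty")
--         return self._data[-1]
--
--     def pop(self):
--         """从栈顶删除元素"""
--         if self.is_empty():
--             raise Empty("Stack is empty")
--         return self._data.pop()
--
--     def copy(self):
--         """完全复制一份"""
--         new = ArrayStack()
--         new._data = self._data[:]
--         return new
--
-- def pop_seq(l):
--     """生成所有可能的出栈顺序"""
--     res = []
--     # 状态栈，包括空栈，已进栈的元素数量为 0，出栈元素顺序列表 (结果)
--     stack = ArrayStack()
--     stack.push((ArrayStack(), 0, []))  # 初始状态
--
--     while not stack.is_empty():
--         # 出栈栈顶，得到当前栈状态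
--         current_stack, pushed_num, popped = stack.pop()
--
--         # Step 1: 查看是否是完整的出栈顺序列表
--         if len(popped) == len(l):
--             # 已出栈的数量等于 len(l) 说明是完整的出栈可能，记录进 res
--             res.append(popped)
--             continue
--
--         # ------ 复制是为了 Step 2 不影响 Step 3 因为二者均依赖于之前状态栈出栈的 current_stack ------
--         # Step 2: 状态栈顶出栈，补充新的可能栈状态
--         # 若进栈个数未满，则复制状态，进栈后压入状态栈
--         if pushed_num < len(l):  # 已进栈个数未满
--             new_stack = current_stack.copy()  # 复制当前栈
--             new_stack.push(l[pushed_num])  # 将下一个元素进栈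
--             new_popped = popped.copy()  # 复制出栈顺序列表
--             new_pushed_num = pushed_num + 1  # 进栈数加一
--             stack.push((new_stack, new_pushed_num, new_popped))  # 压入新状态
--
--         # Step 3: 记录当前栈 (非状态栈) 的出栈可能
--         # 栈顶元素出栈，补充出栈顺序列表
--         if not current_stack.is_empty():
--             new_stack = current_stack.copy()  # 复制当前栈的状态
--             new_popped = popped.copy()  # 复制出栈顺序列表
--             new_popped.append(new_stack.pop())  # 栈顶元素出栈，进入出栈顺序列表
--             stack.push((new_stack, pushed_num, new_popped))  # 压入新状态
--
--     return res
-- ===== SOURCE B (Python) =====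
-- def pop_seq(l):
--     """生成所有可能的出栈顺序 — recursive backtracking instead of an explicit state stack."""
--     res = []
--
--     def helper(stack_list, pushed_num, popped):
--         if len(popped) == len(l):
--             res.append(popped[:])
--             return
--         # pop branch first so the enumeration order matches the LIFO exploration
--         if stack_list:
--             helper(stack_list[:-1], pushed_num, popped + [stack_list[-1]])
--         if pushed_num < len(l):
--             helper(stack_list + [l[pushed_num]], pushed_num + 1, popped)
--
--     helper([], 0, [])
--     return res
-- ===== Notes on version B (the rewrite author's own statement) =====
-- stated objective: simpler
-- what changed: Replaced A's explicit LIFO stack of simulated-stack states (with an ArrayStack class and state copying) by a plain recursive backtracking helper that explores the pop branch before the push branch, yielding the same enumeration order.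
import Mathlib
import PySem

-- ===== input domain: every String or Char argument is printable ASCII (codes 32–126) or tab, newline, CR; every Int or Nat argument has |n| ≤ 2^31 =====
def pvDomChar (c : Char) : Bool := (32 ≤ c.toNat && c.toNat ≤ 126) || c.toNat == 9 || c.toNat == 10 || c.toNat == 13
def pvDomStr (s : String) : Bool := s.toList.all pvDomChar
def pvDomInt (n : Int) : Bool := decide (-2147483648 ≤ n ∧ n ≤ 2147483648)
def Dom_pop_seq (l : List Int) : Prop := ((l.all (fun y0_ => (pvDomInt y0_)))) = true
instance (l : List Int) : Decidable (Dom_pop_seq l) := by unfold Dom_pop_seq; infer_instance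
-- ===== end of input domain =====

-- B replaces A's explicit LIFO state-stack loop by a recursive backtracking helper
-- (pop branch explored before the push branch); objective: simpler.

-- ===== PORT A =====
-- A state of A's search: (current stack with top = head, pushed count, popped order so far).
-- The ArrayStack of states is represented head-as-top, so pushing then popping is cons/head.
-- Measure used for termination of the while-loop (not part of A's data, proof device only).
def pvMeasA (l : List Int) (st : List (List Int × Nat × List Int)) : Nat :=
  (st.map (fun s => 3 ^ (s.1.length + 2 * (l.length - s.2.1)))).sum

-- The while-loop of A: pop the top state, record or expand it (push branch pushed first,
-- pop branch pushed second, hence the pop branch sits on top).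
def popSeqLoop (l : List Int) (st : List (List Int × Nat × List Int))
    (res : List (List Int)) : List (List Int) :=
  match st with
  | [] => res
  | (cs, pn, popped) :: rest =>
    if popped.length = l.length then
      popSeqLoop l rest (res ++ [popped])
    else
      -- Step 2: push branch (if pushed count not yet full)
      let st1 := if h : pn < l.length then (l.get ⟨pn, h⟩ :: cs, pn + 1, popped) :: rest else rest
      -- Step 3: pop branch (if the simulated stack is non-empty), pushed on top
      let st2 := match cs with
        | [] => st1
        | x :: cs' => (cs', pn, popped ++ [x]) :: st1
      popSeqLoop l st2 res
termination_by pvMeasA l st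
decreasing_by
  · simp only [pvMeasA, List.map_cons, List.sum_cons]
    have hp := pow_pos (show (0:Nat) < 3 by norm_num) (cs.length + 2 * (l.length - pn))
    omega
  · simp only [pvMeasA]
    by_cases h : pn < l.length
    · simp only [dif_pos h]
      cases cs with
      | nil =>
        simp only [List.map_cons, List.sum_cons, List.length_cons, List.length_nil]
        have hp := pow_pos (show (0:Nat) < 3 by norm_num) (0 + 1 + 2 * (l.length - (pn + 1)))
        have he : (0:Nat) + 2 * (l.length - pn) = (0 + 1 + 2 * (l.length - (pn + 1))) + 1 := by
          omega
        rw [he, Nat.pow_succ]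
        omega
      | cons x cs' =>
        simp only [List.map_cons, List.sum_cons, List.length_cons]
        have he1 : cs'.length + 1 + 1 + 2 * (l.length - (pn + 1))
            = cs'.length + 2 * (l.length - pn) := by omega
        have he2 : cs'.length + 1 + 2 * (l.length - pn)
            = (cs'.length + 2 * (l.length - pn)) + 1 := by omega
        rw [he1, he2, Nat.pow_succ]
        have hp := pow_pos (show (0:Nat) < 3 by norm_num) (cs'.length + 2 * (l.length - pn))
        omega
    · simp only [dif_neg h]
      cases cs with
      | nil =>
        simp only [List.map_cons, List.sum_cons, List.length_nil]
        have hp := pow_pos (show (0:Nat) < 3 by norm_num) (0 + 2 * (l.length - pn))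
        omega
      | cons x cs' =>
        simp only [List.map_cons, List.sum_cons, List.length_cons]
        have he2 : cs'.length + 1 + 2 * (l.length - pn)
            = (cs'.length + 2 * (l.length - pn)) + 1 := by omega
        rw [he2, Nat.pow_succ]
        have hp := pow_pos (show (0:Nat) < 3 by norm_num) (cs'.length + 2 * (l.length - pn))
        omega

def pop_seq (l : List Int) : List (List Int) :=
  popSeqLoop l [([], 0, [])] []

-- ===== PORT B =====
-- Recursive backtracking helper of Source B: base case records `popped`, then the pop branch,
-- then the push branch, results concatenated in that order.
def popSeqRec (l : List Int) (stack_list : List Int) (pushed_num : Nat)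
    (popped : List Int) : List (List Int) :=
  if popped.length = l.length then
    [popped]
  else
    (match stack_list with
     | [] => []
     | x :: s' => popSeqRec l s' pushed_num (popped ++ [x])) ++
    (if h : pushed_num < l.length then
      popSeqRec l (l.get ⟨pushed_num, h⟩ :: stack_list) (pushed_num + 1) popped
     else [])
termination_by stack_list.length + 2 * (l.length - pushed_num)
decreasing_by
  all_goals simp only [List.length_cons]
  all_goals omega

def pop_seq_alt (l : List Int) : List (List Int) :=
  popSeqRec l [] 0 []

-- ===== PRECONDITION & SPEC =====
def Spec_pop_seq (l : List Int) (out : List (List Int)) : Prop := out = pop_seq_alt l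
instance (l : List Int) (out : List (List Int)) : Decidable (Spec_pop_seq l out) := by unfold Spec_pop_seq; infer_instance

-- ===== CLAIM (what is proved, stated in full; the proofs are below) =====
def Claim_equal_pop_seq : Prop := ∀ (l : List Int), Dom_pop_seq l → Spec_pop_seq l (pop_seq l)

-- ===== LEMMAS AND PROOFS =====

-- Unfolding lemmas for B's backtracking helper.
theorem popSeqRec_done (l : List Int) (cs : List Int) (pn : Nat) (popped : List Int)
    (h : popped.length = l.length) : popSeqRec l cs pn popped = [popped] := by
  rw [popSeqRec.eq_def]
  simp [h]

theorem popSeqRec_not_done (l : List Int) (cs : List Int) (pn : Nat) (popped : List Int)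
    (h : ¬ popped.length = l.length) :
    popSeqRec l cs pn popped =
      (match cs with
       | [] => ([] : List (List Int))
       | x :: s' => popSeqRec l s' pn (popped ++ [x])) ++
      (if hp : pn < l.length then popSeqRec l (l.get ⟨pn, hp⟩ :: cs) (pn + 1) popped
       else []) := by
  rw [popSeqRec.eq_def]
  simp [h]

-- The loop of A, started on a stack of pending states, returns the accumulated results
-- followed by the backtracking results of each pending state, top state first.
theorem popSeqLoop_eq_flatMap (l : List Int) :
    ∀ (st : List (List Int × Nat × List Int)) (res : List (List Int)),
      popSeqLoop l st res
        = res ++ st.flatMap (fun s => popSeqRec l s.1 s.2.1 s.2.2) := by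
  intro st res
  induction st, res using popSeqLoop.induct l with
  | case1 res => simp [popSeqLoop]
  | case2 res cs pn popped rest hdone ih =>
    rw [popSeqLoop, if_pos hdone, ih]
    simp [List.flatMap_cons, popSeqRec_done l cs pn popped hdone]
  | case3 res cs pn popped rest hdone st1 st2 ih =>
    simp only [st2, st1] at ih
    rw [popSeqLoop, if_neg hdone]
    by_cases h : pn < l.length
    · simp only [dif_pos h] at ih ⊢
      cases cs with
      | nil =>
        rw [ih]
        simp [List.flatMap_cons, popSeqRec_not_done l [] pn popped hdone, dif_pos h]
      | cons x cs' =>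
        rw [ih]
        simp [List.flatMap_cons, popSeqRec_not_done l (x :: cs') pn popped hdone, dif_pos h]
    · simp only [dif_neg h] at ih ⊢
      cases cs with
      | nil =>
        rw [ih]
        simp [List.flatMap_cons, popSeqRec_not_done l [] pn popped hdone, dif_neg h]
      | cons x cs' =>
        rw [ih]
        simp [List.flatMap_cons, popSeqRec_not_done l (x :: cs') pn popped hdone, dif_neg h]

theorem pop_seq_eq_alt (l : List Int) : pop_seq l = pop_seq_alt l := by
  rw [pop_seq, pop_seq_alt, popSeqLoop_eq_flatMap]
  simp [List.flatMap_cons]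

-- ===== VERDICT (by name: the statement is the Claim_ definition above) =====
theorem pop_seq_spec : Claim_equal_pop_seq := by
  intro l _
  unfold Spec_pop_seq
  exact pop_seq_eq_alt l
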